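-- pv_equiv track=rewrite | github.com/CUAHSI/QA-AutomationEngine | doe/combinatorial-doe/combinatorial.py | check_three_way
-- ===== SOURCE A (Python) =====
-- def check_three_way(depths, experiments):
--     # Three way check
--     for i in range(0, len(depths)-2):
--         for j in range(i+1, len(depths)-1):
--             for k in range(i+2, len(depths)):
--                 combinations = []
--                 combinations_needed = depths[i] * depths[j] * depths[k]
--                 for l in range(0, len(experiments)):
--                     if (experiments[l][i], experiments[l][j], experiments[l][k]) not in combinations:
--                         combinations.append((experiments[l][i], experiments[l][j], experiments[l][k]))
--                 if len(combinations) != combinations_needed: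
--                     return False
--     return True
-- ===== SOURCE B (Python) =====
-- def check_three_way(depths, experiments):
--     n = len(depths)
--
--     def distinct(vals):
--         # count distinct values by iterative partitioning: repeatedly strip
--         # every copy of the current head from the rest, one count per round
--         count = 0
--         while vals:
--             head = vals[0]
--             vals = [v for v in vals[1:] if v != head]
--             count += 1
--         return count
--
--     return all(
--         distinct([(e[i], e[j], e[k]) for e in experiments])
--         == depths[i] * depths[j] * depths[k]
--         for i in range(n - 2)
--         for j in range(i + 1, n - 1)
--         for k in range(i + 2, n))
-- ===== Notes on version B (the rewrite author's own statement) =====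
-- stated objective: alternative
-- what changed: B replaces A's accumulated seen-list (a membership scan of the dedup list per experiment row) by projecting each triple's rows first and counting distinct combinations via iterative partitioning: repeatedly strip every copy of the current head, one count per round; the triple enumeration becomes a flat generator under all().
-- outside the precondition, e.g. on check_three_way([2, 2, 2, 2], [[0, 0, 0]]): A returns False, B returns False
import Mathlib
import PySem

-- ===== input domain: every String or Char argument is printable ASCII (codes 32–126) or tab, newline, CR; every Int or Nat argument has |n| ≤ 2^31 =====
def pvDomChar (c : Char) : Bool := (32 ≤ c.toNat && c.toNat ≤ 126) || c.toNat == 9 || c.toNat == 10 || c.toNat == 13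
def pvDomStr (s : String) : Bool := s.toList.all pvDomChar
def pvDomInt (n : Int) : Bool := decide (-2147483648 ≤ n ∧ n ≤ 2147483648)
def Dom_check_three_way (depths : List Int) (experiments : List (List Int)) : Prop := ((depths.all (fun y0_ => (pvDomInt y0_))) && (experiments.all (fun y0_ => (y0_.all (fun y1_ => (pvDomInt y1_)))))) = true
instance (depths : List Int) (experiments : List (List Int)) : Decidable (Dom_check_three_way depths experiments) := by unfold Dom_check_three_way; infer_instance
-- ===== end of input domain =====

-- B counts each triple's distinct combinations by iterative partitioning (strip the head's copies from the rest, one count per round) over the projected rows, instead of A's accumulated seen-list with a membership scan per row; alternative decomposition, not claimed faster.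


-- ===== PORT A =====
-- triply nested index loops; for each triple, a fresh `combinations` list is built by rescanning
-- all experiments, appending each projected tuple not already in the list; the early
-- `return False` on a count mismatch is the `all` short-circuit
def check_three_way (depths : List Int) (experiments : List (List Int)) : Bool :=
  (PySem.List.pyRange 0 ((depths.length : Int) - 2) 1).all (fun i =>
    (PySem.List.pyRange (i + 1) ((depths.length : Int) - 1) 1).all (fun j =>
      (PySem.List.pyRange (i + 2) (depths.length : Int) 1).all (fun k =>
        (((PySem.List.pyRange 0 (experiments.length : Int) 1).foldl
            (fun acc l =>
              if acc.contains (PySem.List.pyGetD (PySem.List.pyGetD experiments l []) i 0,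
                  PySem.List.pyGetD (PySem.List.pyGetD experiments l []) j 0,
                  PySem.List.pyGetD (PySem.List.pyGetD experiments l []) k 0)
              then acc
              else acc ++ [(PySem.List.pyGetD (PySem.List.pyGetD experiments l []) i 0,
                  PySem.List.pyGetD (PySem.List.pyGetD experiments l []) j 0,
                  PySem.List.pyGetD (PySem.List.pyGetD experiments l []) k 0)])
            ([] : List (Int × Int × Int))).length : Int)
          == PySem.List.pyGetD depths i 0 * PySem.List.pyGetD depths j 0 * PySem.List.pyGetD depths k 0)))

-- ===== PORT B =====
-- distinct(vals)'s while loop: each round adds 1 and removes the head and all its copies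
def ctwDistinct : List (Int × Int × Int) → Int → Int
  | [], count => count
  | h :: t, count => ctwDistinct (t.filter (fun v => v != h)) (count + 1)
termination_by vals _ => vals.length
decreasing_by
  simp only [List.length_unattach]
  exact Nat.lt_succ_of_le (le_trans (List.length_filter_le _ _) (List.length_attach (l := t)).le)

-- the flat `all(… for i … for j … for k …)` generator, with the row projections
-- materialised per triple and then partition-counted
def check_three_way_alt (depths : List Int) (experiments : List (List Int)) : Bool :=
  (PySem.List.pyRange 0 ((depths.length : Int) - 2) 1).all (fun i =>
    (PySem.List.pyRange (i + 1) ((depths.length : Int) - 1) 1).all (fun j =>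
      (PySem.List.pyRange (i + 2) (depths.length : Int) 1).all (fun k =>
        ctwDistinct (experiments.map (fun e =>
            (PySem.List.pyGetD e i 0, PySem.List.pyGetD e j 0, PySem.List.pyGetD e k 0))) 0
          == PySem.List.pyGetD depths i 0 * PySem.List.pyGetD depths j 0 * PySem.List.pyGetD depths k 0)))

-- ===== PRECONDITION & SPEC =====
-- Pre_ requires (when there are ≥ 3 depths) every experiment row to be at least as long as depths:
-- on a shorter row both Pythons raise IndexError at the first triple reaching the missing index,
-- unless an earlier triple's count already mismatched — then both return False (Pre_ is conservative there).
def Pre_check_three_way (depths : List Int) (experiments : List (List Int)) : Prop :=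
  2 < depths.length → ∀ e ∈ experiments, depths.length ≤ e.length
instance (depths : List Int) (experiments : List (List Int)) : Decidable (Pre_check_three_way depths experiments) := by unfold Pre_check_three_way; infer_instance

def pvWitness_check_three_way : List Int × List (List Int) :=
  ([2, 2, 2], [[0, 0, 0], [1, 1, 1]])

def Spec_check_three_way (depths : List Int) (experiments : List (List Int)) (out : Bool) : Prop := out = check_three_way_alt depths experiments
instance (depths : List Int) (experiments : List (List Int)) (out : Bool) : Decidable (Spec_check_three_way depths experiments out) := by unfold Spec_check_three_way; infer_instance

-- ===== CLAIM (what is proved, stated in full; the proofs are below) =====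
def Claim_equal_check_three_way : Prop := ∀ (depths : List Int) (experiments : List (List Int)), Dom_check_three_way depths experiments → Pre_check_three_way depths experiments → Spec_check_three_way depths experiments (check_three_way depths experiments)

-- ===== LEMMAS AND PROOFS =====

-- the ordered-dedup list A accumulates is set(ys), whose length is the Finset card
theorem ofList_length_eq_card (ys : List (Int × Int × Int)) :
    (PySem.Set.ofList ys).length = ys.toFinset.card := by
  rw [← List.toFinset_card_of_nodup (PySem.Set.nodup_ofList ys)]
  congr 1
  ext x
  simp [PySem.Set.mem_ofList]

-- B's partition loop also counts the Finset card
theorem ctwDistinct_eq_card (ys : List (Int × Int × Int)) (count : Int) :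
    ctwDistinct ys count = count + (ys.toFinset.card : Int) := by
  induction hn : ys.length using Nat.strong_induction_on generalizing ys count with
  | _ n ih =>
    match ys with
    | [] => simp [ctwDistinct]
    | h :: t =>
      rw [show ctwDistinct (h :: t) count
            = ctwDistinct (t.filter (fun v => v != h)) (count + 1) by simp [ctwDistinct],
        ih (t.filter (fun v => v != h)).length
          (hn ▸ Nat.lt_succ_of_le (List.length_filter_le _ _)) _ _ rfl]
      have hts : (t.filter (fun v => v != h)).toFinset = t.toFinset.erase h := by
        ext x; simp; tauto
      have hins : insert h t.toFinset = insert h (t.toFinset.erase h) := by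
        ext x; simp [Finset.mem_erase]; tauto
      rw [hts, List.toFinset_cons, hins,
        Finset.card_insert_of_notMem (Finset.notMem_erase _ _)]
      push_cast
      ring

-- ===== VERDICT (by name: the statement is the Claim_ definition above) =====
theorem check_three_way_spec : Claim_equal_check_three_way := by
  intro depths experiments _ _
  unfold Spec_check_three_way check_three_way check_three_way_alt
  congr 1; funext i; congr 1; funext j; congr 1; funext k
  rw [PySem.List.foldl_pyRange_zero_pyGetD' experiments ([] : List Int)
    (fun (acc : List (Int × Int × Int)) (e : List Int) =>
      if acc.contains (PySem.List.pyGetD e i 0, PySem.List.pyGetD e j 0, PySem.List.pyGetD e k 0)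
      then acc
      else acc ++ [(PySem.List.pyGetD e i 0, PySem.List.pyGetD e j 0, PySem.List.pyGetD e k 0)])
    ([] : List (Int × Int × Int))]
  have hset : experiments.foldl
      (fun (acc : List (Int × Int × Int)) (e : List Int) =>
        if acc.contains (PySem.List.pyGetD e i 0, PySem.List.pyGetD e j 0, PySem.List.pyGetD e k 0)
        then acc
        else acc ++ [(PySem.List.pyGetD e i 0, PySem.List.pyGetD e j 0, PySem.List.pyGetD e k 0)])
      ([] : List (Int × Int × Int))
      = PySem.Set.ofList (experiments.map (fun e =>
          (PySem.List.pyGetD e i 0, PySem.List.pyGetD e j 0, PySem.List.pyGetD e k 0))) := by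
    rw [PySem.Set.ofList_eq_foldl, List.foldl_map]
    rfl
  rw [hset, ctwDistinct_eq_card, ofList_length_eq_card]
  ring_nf
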